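-- pv_equiv track=rewrite | github.com/rafaelperazzo/programacao-web | moodledata/vpl_data/49/usersdata/124/19327/submittedfiles/pico.py | npico
-- ===== SOURCE A (Python) =====
-- def npico(lista):
--     a = 0
--     for i in range (0, len(lista)-1, 1):
--         if lista[i] > lista[i+1]:
--             a = i
--             break
--     if a != 0:
--         cont = 0
--         for i in range(a, len(lista)-1, 1):
--             if lista[i]<=lista[i+1]:
--                 cont = cont + 1
--         if cont == 0:
--             return True
--         else:
--             return False
--     else:
--         return False
-- ===== SOURCE B (Python) =====
-- def npico(lista):
--     signs = [x > y for x, y in zip(lista, lista[1:])]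
--     return signs == sorted(signs) and False in signs and True in signs
-- ===== Notes on version B (the rewrite author's own statement) =====
-- stated objective: alternative
-- what changed: Instead of scanning for the first descent and then re-scanning/counting from it, B builds the list of adjacent comparison signs (x>y booleans) and answers by a monotone-pattern test: the sign list equals its own sorted version (all non-descents before all descents) and contains both a non-descent and a descent.
import Mathlib
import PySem

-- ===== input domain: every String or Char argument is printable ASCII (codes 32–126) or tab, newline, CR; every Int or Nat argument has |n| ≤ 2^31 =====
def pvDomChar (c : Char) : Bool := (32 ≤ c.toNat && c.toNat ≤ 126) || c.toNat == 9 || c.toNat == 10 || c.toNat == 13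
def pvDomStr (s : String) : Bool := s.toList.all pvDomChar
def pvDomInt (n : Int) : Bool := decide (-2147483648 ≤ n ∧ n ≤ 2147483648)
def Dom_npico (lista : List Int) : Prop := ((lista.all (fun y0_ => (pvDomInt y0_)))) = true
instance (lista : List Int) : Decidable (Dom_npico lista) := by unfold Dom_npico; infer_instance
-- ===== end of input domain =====

-- B drops A's find-the-peak-then-reverify scanning entirely: it maps the list to its
-- adjacent comparison signs and answers by a monotone-pattern test (signs == sorted(signs)
-- with both sign values present). Alternative decomposition, same task, not faster.

-- ===== PORT A =====
-- first loop: 'for i in range(0, len(lista)-1, 1): if lista[i] > lista[i+1]: a = i; break'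
def npicoBreak (lista : List Int) : List Int → Int
  | [] => 0
  | i :: rest =>
      if PySem.List.pyGetD lista i 0 > PySem.List.pyGetD lista (i + 1) 0 then i
      else npicoBreak lista rest

def npico (lista : List Int) : Bool :=
  let a := npicoBreak lista (PySem.List.pyRange 0 ((lista.length : Int) - 1) 1)
  if a ≠ 0 then
    let cont := (PySem.List.pyRange a ((lista.length : Int) - 1) 1).foldl
      (fun cont i =>
        if PySem.List.pyGetD lista i 0 ≤ PySem.List.pyGetD lista (i + 1) 0 then cont + 1
        else cont) (0 : Int)
    if cont == 0 then true else false
  else false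

-- ===== PORT B =====
-- signs = [x > y for x, y in zip(lista, lista[1:])]
def npicoSigns (lista : List Int) : List Bool :=
  (lista.zip (PySem.List.slice lista (some 1) none)).map (fun p => decide (p.1 > p.2))

-- return signs == sorted(signs) and False in signs and True in signs
def npico_alt (lista : List Int) : Bool :=
  let signs := npicoSigns lista
  (signs == PySem.List.sorted signs (fun x => x) false)
    && signs.contains false && signs.contains true

-- ===== PRECONDITION & SPEC =====
def Spec_npico (lista : List Int) (out : Bool) : Prop := out = npico_alt lista
instance (lista : List Int) (out : Bool) : Decidable (Spec_npico lista out) := by unfold Spec_npico; infer_instance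

-- ===== CLAIM (what is proved, stated in full; the proofs are below) =====
def Claim_equal_npico : Prop := ∀ (lista : List Int), Dom_npico lista → Spec_npico lista (npico lista)

-- ===== LEMMAS AND PROOFS =====

-- relative index of the first descending adjacent pair
def rFind : List (Int × Int) → Option Nat
  | [] => none
  | (x, y) :: r => if x > y then some 0 else (rFind r).map (· + 1)

-- index of the first 'true' in a sign list
def sFind : List Bool → Option Nat
  | [] => none
  | b :: r => if b then some 0 else (sFind r).map (· + 1)

-- the common characterisation both ports are reduced to, over the sign list
def sChar (s : List Bool) : Bool :=
  match sFind s with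
  | none => false
  | some j => decide (j ≠ 0) && (s.drop (j + 1)).all (fun b => b == true)

theorem sFind_map (ps : List (Int × Int)) :
    sFind (ps.map (fun p => decide (p.1 > p.2))) = rFind ps := by
  induction ps with
  | nil => rfl
  | cons q r ih =>
    obtain ⟨x, y⟩ := q
    by_cases h : x > y <;> simp [sFind, rFind, h, ih]

theorem rFind_drop {ps : List (Int × Int)} {j : Nat} (h : rFind ps = some j) :
    ∃ x y r, ps.drop j = (x, y) :: r ∧ x > y := by
  induction ps generalizing j with
  | nil => simp [rFind] at h
  | cons q r ih =>
    obtain ⟨x, y⟩ := q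
    by_cases hxy : x > y
    · simp [rFind, hxy] at h
      subst h
      exact ⟨x, y, r, rfl, hxy⟩
    · simp [rFind, hxy] at h
      obtain ⟨j', hj', rfl⟩ := h
      obtain ⟨x', y', r', hd, hgt⟩ := ih hj'
      exact ⟨x', y', r', by simpa using hd, hgt⟩

-- A's first loop computes the absolute index of the first descent (0 if none)
theorem npicoBreak_eq (l : List Int) (k : Nat) :
    npicoBreak l (PySem.List.pyRange (k : Int) ((l.length : Int) - 1) 1)
      = (match rFind ((l.zip (l.drop 1)).drop k) with
          | none => 0
          | some j => ((k : Int) + (j : Int))) := by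
  by_cases h : (k : Int) < (l.length : Int) - 1
  · have hk1 : k + 1 < l.length := by omega
    have hklt : k < l.length := by omega
    have hkz : k < (l.zip (l.drop 1)).length := by
      simp [List.length_zip]; omega
    have hdrop : (l.zip (l.drop 1)).drop k
        = (l.zip (l.drop 1))[k] :: (l.zip (l.drop 1)).drop (k + 1) :=
      (List.getElem_cons_drop hkz).symm
    have hpair : (l.zip (l.drop 1))[k] = (l[k]'hklt, l[k + 1]'hk1) := by
      simp [List.getElem_zip]; try omega
    rw [PySem.List.pyRange_one_cons h]
    show (if PySem.List.pyGetD l (k : Int) 0 > PySem.List.pyGetD l ((k : Int) + 1) 0 then (k : Int)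
      else npicoBreak l (PySem.List.pyRange ((k : Int) + 1) ((l.length : Int) - 1) 1)) = _
    have e1 : PySem.List.pyGetD l (k : Int) 0 = l[k]'hklt := by
      simp [hklt]
    have e2 : PySem.List.pyGetD l ((k : Int) + 1) 0 = l[k + 1]'hk1 := by
      have h2 := PySem.List.pyGetD_eq_getElem (xs := l) (i := (k : Int) + 1) (d := 0)
        (by omega) (by omega)
      rw [h2]
      simp only [show ((k : Int) + 1).toNat = k + 1 from by omega]
    have hrec := npicoBreak_eq l (k + 1)
    rw [e1, e2, hdrop, hpair]
    by_cases hgt : l[k]'hklt > l[k + 1]'hk1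
    · simp [rFind, hgt]
    · push_cast at hrec
      rw [if_neg (by omega), hrec]
      simp only [rFind, if_neg hgt]
      cases rFind ((l.zip (l.drop 1)).drop (k + 1)) with
      | none => simp
      | some j => simp; ring
  · rw [PySem.List.pyRange_one_eq_nil (by omega)]
    have : (l.zip (l.drop 1)).drop k = [] := by
      apply List.drop_eq_nil_of_le
      simp [List.length_zip]; omega
    rw [this]
    simp [npicoBreak, rFind]
termination_by l.length - k

-- A's second loop counts the non-descents among pairs from index k on
theorem npicoCont_eq (l : List Int) (k : Nat) (c : Int) :
    ((PySem.List.pyRange (k : Int) ((l.length : Int) - 1) 1).foldl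
      (fun cont i =>
        if PySem.List.pyGetD l i 0 ≤ PySem.List.pyGetD l (i + 1) 0 then cont + 1
        else cont) c)
      = c + ((((l.zip (l.drop 1)).drop k).countP (fun p => decide (p.1 ≤ p.2)) : Int)) := by
  by_cases h : (k : Int) < (l.length : Int) - 1
  · have hk1 : k + 1 < l.length := by omega
    have hklt : k < l.length := by omega
    have hkz : k < (l.zip (l.drop 1)).length := by simp [List.length_zip]; omega
    have hdrop : (l.zip (l.drop 1)).drop k
        = (l.zip (l.drop 1))[k] :: (l.zip (l.drop 1)).drop (k + 1) :=
      (List.getElem_cons_drop hkz).symm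
    have hpair : (l.zip (l.drop 1))[k] = (l[k]'hklt, l[k + 1]'hk1) := by
      simp [List.getElem_zip]; try omega
    have e1 : PySem.List.pyGetD l (k : Int) 0 = l[k]'hklt := by
      simp [hklt]
    have e2 : PySem.List.pyGetD l ((k : Int) + 1) 0 = l[k + 1]'hk1 := by
      have h2 := PySem.List.pyGetD_eq_getElem (xs := l) (i := (k : Int) + 1) (d := 0)
        (by omega) (by omega)
      rw [h2]
      simp only [show ((k : Int) + 1).toNat = k + 1 from by omega]
    rw [PySem.List.pyRange_one_cons h]
    have hrec := npicoCont_eq l (k + 1)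
    push_cast at hrec
    simp only [List.foldl_cons, e1, e2, hrec, hdrop, hpair, List.countP_cons]
    by_cases hle : l[k]'hklt ≤ l[k + 1]'hk1
    · simp [hle]; try ring
    · simp [hle]
  · rw [PySem.List.pyRange_one_eq_nil (by omega)]
    have : (l.zip (l.drop 1)).drop k = [] := by
      apply List.drop_eq_nil_of_le
      simp [List.length_zip]; omega
    rw [this]
    simp
termination_by l.length - k

theorem slice_one_eq_drop (l : List Int) : PySem.List.slice l (some 1) none = l.drop 1 := by
  rw [PySem.List.slice_from_one]; simp

-- A's value is sChar of the sign list
theorem npico_char (l : List Int) :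
    npico l = sChar ((l.zip (l.drop 1)).map (fun p => decide (p.1 > p.2))) := by
  unfold npico sChar
  rw [sFind_map]
  have hb := npicoBreak_eq l 0
  push_cast at hb
  simp only [List.drop_zero] at hb
  rw [hb]
  cases hf : rFind (l.zip (l.drop 1)) with
  | none => simp
  | some j =>
    simp only
    by_cases hj : j = 0
    · subst hj; simp
    · rw [if_pos (by simpa using hj)]
      have hjd : (decide (j ≠ 0) : Bool) = true := by simp [hj]
      rw [hjd, Bool.true_and]
      have hc := npicoCont_eq l j 0
      simp only [zero_add, hc]
      obtain ⟨x, y, r, hd, hgt⟩ := rFind_drop hf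
      have hd1 : (l.zip (l.drop 1)).drop (j + 1) = r := by
        rw [← List.drop_drop]
        rw [hd]; rfl
      rw [hd, ← List.map_drop, hd1]
      have hx : (decide (x ≤ y) : Bool) = false := by simp; omega
      simp only [List.countP_cons, hx]
      by_cases hall : ∀ p ∈ r, p.2 < p.1
      · have h0 : r.countP (fun p => decide (p.1 ≤ p.2)) = 0 :=
          List.countP_eq_zero.mpr
            (fun p hp => by simp only [decide_eq_true_eq, not_le]; exact hall p hp)
        have h1 : (r.map (fun p => decide (p.1 > p.2))).all (fun b => b == true) = true := by
          simp only [List.all_map, List.all_eq_true]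
          intro p hp
          simpa using hall p hp
        simp [h0]
        exact fun a b hab => hall (a, b) hab
      · rw [not_forall] at hall
        simp only [not_forall, not_lt, exists_prop] at hall
        obtain ⟨p, hp, hle⟩ := hall
        have h0 : r.countP (fun p => decide (p.1 ≤ p.2)) ≠ 0 := by
          simp only [ne_eq, List.countP_eq_zero, not_forall]
          exact ⟨p, hp, by simp; omega⟩
        have h1 : (r.map (fun p => decide (p.1 > p.2))).all (fun b => b == true) = false := by
          simp only [List.all_map, List.all_eq_false]
          exact ⟨p, hp, by simp; omega⟩
        simp [h0]
        exact ⟨p.1, p.2, by simpa using hp, hle⟩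

-- 'signs == sorted(signs)' is exactly 'signs is nondecreasing'
theorem beq_sorted_eq_pairwise (s : List Bool) :
    (s == PySem.List.sorted s (fun x => x) false)
      = decide (s.Pairwise (fun a b => a ≤ b)) := by
  by_cases h : s.Pairwise (fun a b => a ≤ b)
  · rw [PySem.List.sorted_eq_self_of_pairwise _ _ h]
    simp [h]
  · have : s ≠ PySem.List.sorted s (fun x => x) false := by
      intro he
      exact h (by rw [he]; exact PySem.List.sorted_pairwise s (fun x => x))
    simp [this, h]

-- a list of all-true booleans is trivially nondecreasing
theorem allTrue_pairwise (t : List Bool) (h : ∀ x ∈ t, x = true) :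
    t.Pairwise (fun a b => a ≤ b) := by
  induction t with
  | nil => exact List.Pairwise.nil
  | cons c u ih =>
    rw [List.pairwise_cons]
    exact ⟨fun x hx => by rw [h c List.mem_cons_self, h x (List.mem_cons_of_mem _ hx)],
      ih (fun x hx => h x (List.mem_cons_of_mem _ hx))⟩

-- a nondecreasing sign list containing a 'true' is all-true after its first 'true'
theorem pairwise_contains_true (r : List Bool) :
    (decide (r.Pairwise (fun a b => a ≤ b)) && r.contains true)
      = (match sFind r with
          | none => false
          | some j => (r.drop (j + 1)).all (fun b => b == true)) := by
  induction r with
  | nil => simp [sFind]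
  | cons b t ih =>
    cases b with
    | true =>
      have hR : (match sFind (true :: t) with
          | none => false
          | some j => ((true :: t).drop (j + 1)).all (fun b => b == true))
          = t.all (fun b => b == true) := by
        simp [sFind]
      rw [hR]
      by_cases ha : t.all (fun b => b == true) = true
      · have hall : ∀ x ∈ t, x = true := by
          intro x hx
          simpa using List.all_eq_true.mp ha x hx
        have hp : (true :: t).Pairwise (fun a b => a ≤ b) :=
          List.pairwise_cons.mpr ⟨fun x hx => by rw [hall x hx], allTrue_pairwise t hall⟩
        have hnf : false ∉ t := fun h => by simpa using hall false h
        simp [hp, hnf]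
      · have haf : t.all (fun b => b == true) = false := Bool.eq_false_iff.mpr ha
        obtain ⟨x, hx, hxf⟩ := List.all_eq_false.mp haf
        have hxf' : x = false := by cases x <;> simp_all
        subst hxf'
        have hnp : ¬ (true :: t).Pairwise (fun a b => a ≤ b) := by
          rw [List.pairwise_cons]
          rintro ⟨hh, -⟩
          exact absurd (hh false hx) (by decide)
        simp [hnp, hx]
    | false =>
      have hpw : (decide ((false :: t).Pairwise (fun a b => a ≤ b)) : Bool)
          = decide (t.Pairwise (fun a b => a ≤ b)) := by
        simp [List.pairwise_cons, Bool.false_le]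
      have hct : (false :: t).contains true = t.contains true := by
        simp
      cases hs : sFind t with
      | none =>
        rw [show sFind (false :: t) = none by simp [sFind, hs]]
        rw [hpw, hct]
        simpa [hs] using ih
      | some j =>
        rw [show sFind (false :: t) = some (j + 1) by simp [sFind, hs]]
        rw [hpw, hct]
        simp only [List.drop_succ_cons]
        simpa [hs] using ih

-- 'signs == sorted(signs) and False in signs and True in signs' over any sign list
theorem monotone_test_char (s : List Bool) :
    ((s == PySem.List.sorted s (fun x => x) false)
      && s.contains false && s.contains true) = sChar s := by
  rw [beq_sorted_eq_pairwise]
  cases s with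
  | nil => simp [sChar, sFind]
  | cons b t =>
    cases b with
    | true =>
      have hR : sChar (true :: t) = false := by simp [sChar, sFind]
      rw [hR]
      by_cases hp : (true :: t).Pairwise (fun a b => a ≤ b)
      · have hall : ∀ x ∈ t, x = true := by
          intro x hx
          have := (List.pairwise_cons.mp hp).1 x hx
          cases x
          · exact absurd this (by decide)
          · rfl
        have hnf : false ∉ t := fun h => by simpa using hall false h
        have hcf : (true :: t).contains false = false := by
          simp [List.contains_eq_mem, hnf]
        rw [hcf]
        simp
      · simp [hp]
    | false =>
      have hpw : (decide ((false :: t).Pairwise (fun a b => a ≤ b)) : Bool)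
          = decide (t.Pairwise (fun a b => a ≤ b)) := by
        simp [List.pairwise_cons, Bool.false_le]
      have hcf : (false :: t).contains false = true := by simp
      have hct : (false :: t).contains true = t.contains true := by
        simp
      rw [hpw, hcf, hct, Bool.and_true]
      rw [pairwise_contains_true t]
      cases hs : sFind t with
      | none => simp [sChar, sFind, hs]
      | some j => simp [sChar, sFind, hs]

-- B's value is sChar of the sign list
theorem npico_alt_char (l : List Int) :
    npico_alt l = sChar ((l.zip (l.drop 1)).map (fun p => decide (p.1 > p.2))) := by
  have h := monotone_test_char (npicoSigns l)
  simp only [npico_alt, h]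
  unfold npicoSigns
  rw [slice_one_eq_drop]

-- ===== VERDICT (by name: the statement is the Claim_ definition above) =====
theorem npico_spec : Claim_equal_npico := by
  intro l _
  unfold Spec_npico
  rw [npico_char, npico_alt_char]
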